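-- pv_equiv track=rewrite | github.com/patelkrish5090/Error-Correction-SOP | shor_9bit.py | interpret_syndrome_eigenvalues
-- ===== SOURCE A (Python) =====
-- def interpret_syndrome_eigenvalues(syndrome_bits):
--     """
--     Interpret syndrome eigenvalues to determine error location and type.
--     Returns tuple: (error_type, error_qubit)
--     """
--     eigenvalues = [1 if bit == 0 else -1 for bit in syndrome_bits]
--
--     # Bit-flip error detection (per 3-qubit block)
--     for block in range(3):
--         s1, s2 = eigenvalues[block*2], eigenvalues[block*2 + 1]
--         if s1 == -1 and s2 == 1:    # First qubit in block
--             return ('X', block*3)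
--         elif s1 == -1 and s2 == -1: # Second qubit in block
--             return ('X', block*3 + 1)
--         elif s1 == 1 and s2 == -1:  # Third qubit in block
--             return ('X', block*3 + 2)
--
--     # Phase-flip error detection (per outer code block)
--     s_phase1, s_phase2 = eigenvalues[6], eigenvalues[7]
--     if s_phase1 == -1 and s_phase2 == 1:   # Phase error in block 1
--         return ('Z', 0)  # First qubit of block 1
--     elif s_phase1 == -1 and s_phase2 == -1: # Phase error in block 2
--         return ('Z', 3)  # First qubit of block 2
--     elif s_phase1 == 1 and s_phase2 == -1:  # Phase error in block 3
--         return ('Z', 6)  # First qubit of block 3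
--
--     return ('I', None)  # No error detected
-- ===== SOURCE B (Python) =====
-- def _first_error(flags):
--     # Returns (pair_index, in-pair offset) for the first raised flag, or None.
--     # Offsets encode which qubit of the pair's block is hit: first flag of a
--     # pair set -> offset 0 or 1 depending on its partner, only the second
--     # flag set -> offset 2.
--     if True not in flags:
--         return None
--     i = flags.index(True)
--     off = 2 if i % 2 else (1 if flags[i + 1] else 0)
--     return i // 2, off
--
--
-- def interpret_syndrome_eigenvalues(syndrome_bits):
--     # Staged decoding: normalise the first 8 bits to boolean flags (padding
--     # missing trailing stabilizers with "no error"), then locate the first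
--     # raised flag with list.index and turn its position into the answer
--     # arithmetically -- no per-block branch chains.
--     flags = [bit != 0 for bit in syndrome_bits[:8]]
--     flags += [False] * (8 - len(flags))
--     hit = _first_error(flags[:6])
--     if hit is not None:
--         block, off = hit
--         return ('X', 3 * block + off)
--     hit = _first_error(flags[6:8])
--     if hit is not None:
--         return ('Z', 3 * hit[1])
--     return ('I', None)
-- ===== Notes on version B (the rewrite author's own statement) =====
-- stated objective: alternative
-- what changed: B replaces A's per-block scan with if/elif case chains by a staged find-first-set decoding: it normalises only the first 8 bits to a padded boolean flag list (instead of mapping the whole input to eigenvalues), locates the first raised flag with list.index, and converts that position arithmetically (offset = 2 if odd else partner flag) into the error type and qubit via one shared helper for both the X and Z stages.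
import Mathlib
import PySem

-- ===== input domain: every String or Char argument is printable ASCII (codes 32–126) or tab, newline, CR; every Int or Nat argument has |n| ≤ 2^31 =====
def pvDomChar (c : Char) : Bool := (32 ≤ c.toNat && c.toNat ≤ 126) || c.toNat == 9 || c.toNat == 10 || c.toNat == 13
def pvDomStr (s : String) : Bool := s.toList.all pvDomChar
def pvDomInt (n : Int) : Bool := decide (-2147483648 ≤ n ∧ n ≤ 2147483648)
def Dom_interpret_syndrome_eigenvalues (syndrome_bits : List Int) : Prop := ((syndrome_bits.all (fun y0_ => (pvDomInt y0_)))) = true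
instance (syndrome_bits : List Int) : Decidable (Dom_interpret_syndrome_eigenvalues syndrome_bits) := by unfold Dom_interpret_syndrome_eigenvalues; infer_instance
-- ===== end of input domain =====

-- B replaces A's per-block branch-chain scan by a staged find-first-set decoding: it
-- normalises the first 8 bits to a padded boolean flag list, finds the first raised
-- flag with list.index, and turns its position arithmetically into the answer
-- (alternative decomposition, same cost).

-- ===== PORT A =====
-- Literal transliteration of A; the for-loop with early return is a fold over range(3)
-- carrying an Option result.  Out-of-range indexing (Python: IndexError) is excluded by
-- Pre_; the port reads a default 0 there.
def interpret_syndrome_eigenvalues (syndrome_bits : List Int) : String × Option Int :=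
  let eigenvalues := syndrome_bits.map (fun bit => if bit = 0 then (1 : Int) else -1)
  let loop : Option (String × Option Int) :=
    (PySem.List.pyRange 0 3 1).foldl (fun acc block =>
      match acc with
      | some r => some r
      | none =>
        let s1 := (PySem.List.pyGet? eigenvalues (block * 2)).getD 0
        let s2 := (PySem.List.pyGet? eigenvalues (block * 2 + 1)).getD 0
        if s1 = -1 ∧ s2 = 1 then some ("X", some (block * 3))
        else if s1 = -1 ∧ s2 = -1 then some ("X", some (block * 3 + 1))
        else if s1 = 1 ∧ s2 = -1 then some ("X", some (block * 3 + 2))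
        else none) none
  match loop with
  | some r => r
  | none =>
    let sp1 := (PySem.List.pyGet? eigenvalues 6).getD 0
    let sp2 := (PySem.List.pyGet? eigenvalues 7).getD 0
    if sp1 = -1 ∧ sp2 = 1 then ("Z", some 0)
    else if sp1 = -1 ∧ sp2 = -1 then ("Z", some 3)
    else if sp1 = 1 ∧ sp2 = -1 then ("Z", some 6)
    else ("I", none)

-- ===== PORT B =====
-- Transliteration of Source B's helper _first_error: first raised flag → (pair index, offset).
-- flags[i + 1] is always in range when reached (i even, even-length flag list); ported
-- with a defaulted pyGet? exactly as Python reads it.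
def pvFirstError (flags : List Bool) : Option (Int × Int) :=
  if true ∈ flags then
    match PySem.List.index? flags true with
    | none => none
    | some i =>
      let off : Int := if i % 2 ≠ 0 then 2
        else if (PySem.List.pyGet? flags ((i : Int) + 1)).getD false then 1 else 0
      some (((i / 2 : Nat) : Int), off)
  else none

-- Transliteration of Source B's main function (slices, padding, two staged helper calls).
def interpret_syndrome_eigenvalues_alt (syndrome_bits : List Int) : String × Option Int :=
  let flags0 := (PySem.List.slice syndrome_bits none (some 8)).map (fun bit => bit != 0)
  let flags := flags0 ++ List.replicate (8 - flags0.length) false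
  match pvFirstError (PySem.List.slice flags none (some 6)) with
  | some (block, off) => ("X", some (3 * block + off))
  | none =>
    match pvFirstError (PySem.List.slice flags (some 6) (some 8)) with
    | some hit => ("Z", some (3 * hit.2))
    | none => ("I", none)

-- ===== PRECONDITION & SPEC =====
-- Pre_ holds exactly where the Python A returns (no IndexError): either all eight
-- indices exist, or some fully-in-range stabilizer pair carries a nonzero bit, which
-- triggers the early X return before any out-of-range access.
def Pre_interpret_syndrome_eigenvalues (syndrome_bits : List Int) : Prop :=
  8 ≤ syndrome_bits.length ∨
  (2 ≤ syndrome_bits.length ∧ (syndrome_bits.getD 0 0 ≠ 0 ∨ syndrome_bits.getD 1 0 ≠ 0)) ∨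
  (4 ≤ syndrome_bits.length ∧ (syndrome_bits.getD 2 0 ≠ 0 ∨ syndrome_bits.getD 3 0 ≠ 0)) ∨
  (6 ≤ syndrome_bits.length ∧ (syndrome_bits.getD 4 0 ≠ 0 ∨ syndrome_bits.getD 5 0 ≠ 0))
instance (syndrome_bits : List Int) : Decidable (Pre_interpret_syndrome_eigenvalues syndrome_bits) := by unfold Pre_interpret_syndrome_eigenvalues; infer_instance
def pvWitness_interpret_syndrome_eigenvalues : List Int := [1, 0, 0, 0, 0, 0, 0, 0]

def Spec_interpret_syndrome_eigenvalues (syndrome_bits : List Int) (out : String × Option Int) : Prop := out = interpret_syndrome_eigenvalues_alt syndrome_bits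
instance (syndrome_bits : List Int) (out : String × Option Int) : Decidable (Spec_interpret_syndrome_eigenvalues syndrome_bits out) := by unfold Spec_interpret_syndrome_eigenvalues; infer_instance

-- ===== CLAIM (what is proved, stated in full; the proofs are below) =====
def Claim_equal_interpret_syndrome_eigenvalues : Prop := ∀ (syndrome_bits : List Int), Dom_interpret_syndrome_eigenvalues syndrome_bits → Pre_interpret_syndrome_eigenvalues syndrome_bits → Spec_interpret_syndrome_eigenvalues syndrome_bits (interpret_syndrome_eigenvalues syndrome_bits)

-- ===== LEMMAS AND PROOFS =====

-- Proof-side helpers: both ports are reduced to core functions of an 8-slot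
-- Option Bool summary of the input (some flag = bit present and its nonzero-ness,
-- none = bit missing), and the equivalence is decided once over all summaries.

-- pvACore is port A's body with the eigenvalue list as a parameter (A bits = pvACore (bits.map f), by rfl).
def pvACore (eigenvalues : List Int) : String × Option Int :=
  let loop : Option (String × Option Int) :=
    (PySem.List.pyRange 0 3 1).foldl (fun acc block =>
      match acc with
      | some r => some r
      | none =>
        let s1 := (PySem.List.pyGet? eigenvalues (block * 2)).getD 0
        let s2 := (PySem.List.pyGet? eigenvalues (block * 2 + 1)).getD 0
        if s1 = -1 ∧ s2 = 1 then some ("X", some (block * 3))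
        else if s1 = -1 ∧ s2 = -1 then some ("X", some (block * 3 + 1))
        else if s1 = 1 ∧ s2 = -1 then some ("X", some (block * 3 + 2))
        else none) none
  match loop with
  | some r => r
  | none =>
    let sp1 := (PySem.List.pyGet? eigenvalues 6).getD 0
    let sp2 := (PySem.List.pyGet? eigenvalues 7).getD 0
    if sp1 = -1 ∧ sp2 = 1 then ("Z", some 0)
    else if sp1 = -1 ∧ sp2 = -1 then ("Z", some 3)
    else if sp1 = 1 ∧ sp2 = -1 then ("Z", some 6)
    else ("I", none)

-- pvBCore is port B's body with the truncated flag list as a parameter (alt bits = pvBCore (slice bits [:8] |>.map (!= 0)), by rfl).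
def pvBCore (flags0 : List Bool) : String × Option Int :=
  let flags := flags0 ++ List.replicate (8 - flags0.length) false
  match pvFirstError (PySem.List.slice flags none (some 6)) with
  | some (block, off) => ("X", some (3 * block + off))
  | none =>
    match pvFirstError (PySem.List.slice flags (some 6) (some 8)) with
    | some hit => ("Z", some (3 * hit.2))
    | none => ("I", none)

-- Decode the summary into each core's input.
def pvS (c : Option Bool) : Int := match c with | none => 0 | some b => if b then -1 else 1
def pvEv (cs : List (Option Bool)) : List Int := (cs.takeWhile Option.isSome).map pvS
def pvFl (cs : List (Option Bool)) : List Bool := (cs.takeWhile Option.isSome).map (fun c => c.getD false)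

-- Summaries coming from an actual list are prefix-shaped; pvPre' mirrors Pre_ on summaries.
def pvChain (c0 c1 c2 c3 c4 c5 c6 c7 : Option Bool) : Bool :=
  (!c1.isSome || c0.isSome) && (!c2.isSome || c1.isSome) && (!c3.isSome || c2.isSome) &&
  (!c4.isSome || c3.isSome) && (!c5.isSome || c4.isSome) && (!c6.isSome || c5.isSome) &&
  (!c7.isSome || c6.isSome)
def pvPre' (c0 c1 c2 c3 c4 c5 _c6 c7 : Option Bool) : Bool :=
  c7.isSome ||
  (c1.isSome && (c0.getD false || c1.getD false)) ||
  (c3.isSome && (c2.getD false || c3.getD false)) ||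
  (c5.isSome && (c4.getD false || c5.getD false))

theorem pvS_flag (b : Int) : pvS (some (b != 0)) = if b = 0 then 1 else -1 := by
  by_cases h : b = 0 <;> simp [pvS, h]

theorem pvACore_append (e0 e1 e2 e3 e4 e5 e6 e7 : Int) (extra : List Int) :
    pvACore (e0 :: e1 :: e2 :: e3 :: e4 :: e5 :: e6 :: e7 :: extra) =
    pvACore [e0, e1, e2, e3, e4, e5, e6, e7] := by
  have hr : PySem.List.pyRange 0 3 1 = [0, 1, 2] := by decide
  simp only [pvACore, hr, List.foldl]
  norm_num [PySem.List.pyGet?_of_nonneg, show Int.toNat 2 = 2 from rfl,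
    show Int.toNat 3 = 3 from rfl, show Int.toNat 4 = 4 from rfl, show Int.toNat 5 = 5 from rfl,
    show Int.toNat 6 = 6 from rfl, show Int.toNat 7 = 7 from rfl]

theorem pvBridge : ∀ (c0 c1 c2 c3 c4 c5 c6 c7 : Option Bool),
    pvChain c0 c1 c2 c3 c4 c5 c6 c7 = true → pvPre' c0 c1 c2 c3 c4 c5 c6 c7 = true →
    pvACore (pvEv [c0, c1, c2, c3, c4, c5, c6, c7]) = pvBCore (pvFl [c0, c1, c2, c3, c4, c5, c6, c7]) := by
  decide

-- ===== VERDICT (by name: the statement is the Claim_ definition above) =====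
set_option maxHeartbeats 1000000 in
theorem interpret_syndrome_eigenvalues_spec : Claim_equal_interpret_syndrome_eigenvalues := by
  intro bits _ hpre
  unfold Spec_interpret_syndrome_eigenvalues
  unfold Pre_interpret_syndrome_eigenvalues at hpre
  match bits with
  | [] => simp at hpre
  | [b0] => simp [List.getD] at hpre
  | [b0, b1] =>
      norm_num [List.getD] at hpre
      have e1 : pvEv [some (b0 != 0), some (b1 != 0), none, none, none, none, none, none] = [(if b0 = 0 then (1:Int) else -1), (if b1 = 0 then (1:Int) else -1)] := by simp [pvEv, pvS_flag]
      have e2 : pvFl [some (b0 != 0), some (b1 != 0), none, none, none, none, none, none] = [(b0 != 0), (b1 != 0)] := by simp [pvFl]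
      have e3 : interpret_syndrome_eigenvalues_alt [b0, b1] = pvBCore [(b0 != 0), (b1 != 0)] := by
        show pvBCore ((PySem.List.slice [b0, b1] none (some 8)).map (fun bit => bit != 0)) = _
        norm_num [PySem.List.slice_to, show Int.toNat 8 = 8 from rfl]
      rw [show interpret_syndrome_eigenvalues [b0, b1] = pvACore [(if b0 = 0 then (1:Int) else -1), (if b1 = 0 then (1:Int) else -1)] from rfl,
          ← e1, e3, ← e2]
      exact pvBridge _ _ _ _ _ _ _ _ (by simp [pvChain]) (by simp [pvPre', bne_iff_ne]; tauto)
  | [b0, b1, b2] =>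
      norm_num [List.getD] at hpre
      have e1 : pvEv [some (b0 != 0), some (b1 != 0), some (b2 != 0), none, none, none, none, none] = [(if b0 = 0 then (1:Int) else -1), (if b1 = 0 then (1:Int) else -1), (if b2 = 0 then (1:Int) else -1)] := by simp [pvEv, pvS_flag]
      have e2 : pvFl [some (b0 != 0), some (b1 != 0), some (b2 != 0), none, none, none, none, none] = [(b0 != 0), (b1 != 0), (b2 != 0)] := by simp [pvFl]
      have e3 : interpret_syndrome_eigenvalues_alt [b0, b1, b2] = pvBCore [(b0 != 0), (b1 != 0), (b2 != 0)] := by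
        show pvBCore ((PySem.List.slice [b0, b1, b2] none (some 8)).map (fun bit => bit != 0)) = _
        norm_num [PySem.List.slice_to, show Int.toNat 8 = 8 from rfl]
      rw [show interpret_syndrome_eigenvalues [b0, b1, b2] = pvACore [(if b0 = 0 then (1:Int) else -1), (if b1 = 0 then (1:Int) else -1), (if b2 = 0 then (1:Int) else -1)] from rfl,
          ← e1, e3, ← e2]
      exact pvBridge _ _ _ _ _ _ _ _ (by simp [pvChain]) (by simp [pvPre', bne_iff_ne]; tauto)
  | [b0, b1, b2, b3] =>
      norm_num [List.getD] at hpre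
      have e1 : pvEv [some (b0 != 0), some (b1 != 0), some (b2 != 0), some (b3 != 0), none, none, none, none] = [(if b0 = 0 then (1:Int) else -1), (if b1 = 0 then (1:Int) else -1), (if b2 = 0 then (1:Int) else -1), (if b3 = 0 then (1:Int) else -1)] := by simp [pvEv, pvS_flag]
      have e2 : pvFl [some (b0 != 0), some (b1 != 0), some (b2 != 0), some (b3 != 0), none, none, none, none] = [(b0 != 0), (b1 != 0), (b2 != 0), (b3 != 0)] := by simp [pvFl]
      have e3 : interpret_syndrome_eigenvalues_alt [b0, b1, b2, b3] = pvBCore [(b0 != 0), (b1 != 0), (b2 != 0), (b3 != 0)] := by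
        show pvBCore ((PySem.List.slice [b0, b1, b2, b3] none (some 8)).map (fun bit => bit != 0)) = _
        norm_num [PySem.List.slice_to, show Int.toNat 8 = 8 from rfl]
      rw [show interpret_syndrome_eigenvalues [b0, b1, b2, b3] = pvACore [(if b0 = 0 then (1:Int) else -1), (if b1 = 0 then (1:Int) else -1), (if b2 = 0 then (1:Int) else -1), (if b3 = 0 then (1:Int) else -1)] from rfl,
          ← e1, e3, ← e2]
      exact pvBridge _ _ _ _ _ _ _ _ (by simp [pvChain]) (by simp [pvPre', bne_iff_ne]; tauto)
  | [b0, b1, b2, b3, b4] =>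
      norm_num [List.getD] at hpre
      have e1 : pvEv [some (b0 != 0), some (b1 != 0), some (b2 != 0), some (b3 != 0), some (b4 != 0), none, none, none] = [(if b0 = 0 then (1:Int) else -1), (if b1 = 0 then (1:Int) else -1), (if b2 = 0 then (1:Int) else -1), (if b3 = 0 then (1:Int) else -1), (if b4 = 0 then (1:Int) else -1)] := by simp [pvEv, pvS_flag]
      have e2 : pvFl [some (b0 != 0), some (b1 != 0), some (b2 != 0), some (b3 != 0), some (b4 != 0), none, none, none] = [(b0 != 0), (b1 != 0), (b2 != 0), (b3 != 0), (b4 != 0)] := by simp [pvFl]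
      have e3 : interpret_syndrome_eigenvalues_alt [b0, b1, b2, b3, b4] = pvBCore [(b0 != 0), (b1 != 0), (b2 != 0), (b3 != 0), (b4 != 0)] := by
        show pvBCore ((PySem.List.slice [b0, b1, b2, b3, b4] none (some 8)).map (fun bit => bit != 0)) = _
        norm_num [PySem.List.slice_to, show Int.toNat 8 = 8 from rfl]
      rw [show interpret_syndrome_eigenvalues [b0, b1, b2, b3, b4] = pvACore [(if b0 = 0 then (1:Int) else -1), (if b1 = 0 then (1:Int) else -1), (if b2 = 0 then (1:Int) else -1), (if b3 = 0 then (1:Int) else -1), (if b4 = 0 then (1:Int) else -1)] from rfl,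
          ← e1, e3, ← e2]
      exact pvBridge _ _ _ _ _ _ _ _ (by simp [pvChain]) (by simp [pvPre', bne_iff_ne]; tauto)
  | [b0, b1, b2, b3, b4, b5] =>
      norm_num [List.getD] at hpre
      have e1 : pvEv [some (b0 != 0), some (b1 != 0), some (b2 != 0), some (b3 != 0), some (b4 != 0), some (b5 != 0), none, none] = [(if b0 = 0 then (1:Int) else -1), (if b1 = 0 then (1:Int) else -1), (if b2 = 0 then (1:Int) else -1), (if b3 = 0 then (1:Int) else -1), (if b4 = 0 then (1:Int) else -1), (if b5 = 0 then (1:Int) else -1)] := by simp [pvEv, pvS_flag]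
      have e2 : pvFl [some (b0 != 0), some (b1 != 0), some (b2 != 0), some (b3 != 0), some (b4 != 0), some (b5 != 0), none, none] = [(b0 != 0), (b1 != 0), (b2 != 0), (b3 != 0), (b4 != 0), (b5 != 0)] := by simp [pvFl]
      have e3 : interpret_syndrome_eigenvalues_alt [b0, b1, b2, b3, b4, b5] = pvBCore [(b0 != 0), (b1 != 0), (b2 != 0), (b3 != 0), (b4 != 0), (b5 != 0)] := by
        show pvBCore ((PySem.List.slice [b0, b1, b2, b3, b4, b5] none (some 8)).map (fun bit => bit != 0)) = _
        norm_num [PySem.List.slice_to, show Int.toNat 8 = 8 from rfl]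
      rw [show interpret_syndrome_eigenvalues [b0, b1, b2, b3, b4, b5] = pvACore [(if b0 = 0 then (1:Int) else -1), (if b1 = 0 then (1:Int) else -1), (if b2 = 0 then (1:Int) else -1), (if b3 = 0 then (1:Int) else -1), (if b4 = 0 then (1:Int) else -1), (if b5 = 0 then (1:Int) else -1)] from rfl,
          ← e1, e3, ← e2]
      exact pvBridge _ _ _ _ _ _ _ _ (by simp [pvChain]) (by simp [pvPre', bne_iff_ne]; tauto)
  | [b0, b1, b2, b3, b4, b5, b6] =>
      norm_num [List.getD] at hpre
      have e1 : pvEv [some (b0 != 0), some (b1 != 0), some (b2 != 0), some (b3 != 0), some (b4 != 0), some (b5 != 0), some (b6 != 0), none] = [(if b0 = 0 then (1:Int) else -1), (if b1 = 0 then (1:Int) else -1), (if b2 = 0 then (1:Int) else -1), (if b3 = 0 then (1:Int) else -1), (if b4 = 0 then (1:Int) else -1), (if b5 = 0 then (1:Int) else -1), (if b6 = 0 then (1:Int) else -1)] := by simp [pvEv, pvS_flag]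
      have e2 : pvFl [some (b0 != 0), some (b1 != 0), some (b2 != 0), some (b3 != 0), some (b4 != 0), some (b5 != 0), some (b6 != 0), none] = [(b0 != 0), (b1 != 0), (b2 != 0), (b3 != 0), (b4 != 0), (b5 != 0), (b6 != 0)] := by simp [pvFl]
      have e3 : interpret_syndrome_eigenvalues_alt [b0, b1, b2, b3, b4, b5, b6] = pvBCore [(b0 != 0), (b1 != 0), (b2 != 0), (b3 != 0), (b4 != 0), (b5 != 0), (b6 != 0)] := by
        show pvBCore ((PySem.List.slice [b0, b1, b2, b3, b4, b5, b6] none (some 8)).map (fun bit => bit != 0)) = _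
        norm_num [PySem.List.slice_to, show Int.toNat 8 = 8 from rfl]
      rw [show interpret_syndrome_eigenvalues [b0, b1, b2, b3, b4, b5, b6] = pvACore [(if b0 = 0 then (1:Int) else -1), (if b1 = 0 then (1:Int) else -1), (if b2 = 0 then (1:Int) else -1), (if b3 = 0 then (1:Int) else -1), (if b4 = 0 then (1:Int) else -1), (if b5 = 0 then (1:Int) else -1), (if b6 = 0 then (1:Int) else -1)] from rfl,
          ← e1, e3, ← e2]
      exact pvBridge _ _ _ _ _ _ _ _ (by simp [pvChain]) (by simp [pvPre', bne_iff_ne]; tauto)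
  | b0 :: b1 :: b2 :: b3 :: b4 :: b5 :: b6 :: b7 :: rest =>
      have e1 : pvEv [some (b0 != 0), some (b1 != 0), some (b2 != 0), some (b3 != 0), some (b4 != 0), some (b5 != 0), some (b6 != 0), some (b7 != 0)] = [(if b0 = 0 then (1:Int) else -1), (if b1 = 0 then (1:Int) else -1), (if b2 = 0 then (1:Int) else -1), (if b3 = 0 then (1:Int) else -1), (if b4 = 0 then (1:Int) else -1), (if b5 = 0 then (1:Int) else -1), (if b6 = 0 then (1:Int) else -1), (if b7 = 0 then (1:Int) else -1)] := by simp [pvEv, pvS_flag]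
      have e2 : pvFl [some (b0 != 0), some (b1 != 0), some (b2 != 0), some (b3 != 0), some (b4 != 0), some (b5 != 0), some (b6 != 0), some (b7 != 0)] = [(b0 != 0), (b1 != 0), (b2 != 0), (b3 != 0), (b4 != 0), (b5 != 0), (b6 != 0), (b7 != 0)] := by simp [pvFl]
      have e3 : interpret_syndrome_eigenvalues_alt (b0 :: b1 :: b2 :: b3 :: b4 :: b5 :: b6 :: b7 :: rest) = pvBCore [(b0 != 0), (b1 != 0), (b2 != 0), (b3 != 0), (b4 != 0), (b5 != 0), (b6 != 0), (b7 != 0)] := by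
        show pvBCore ((PySem.List.slice (b0 :: b1 :: b2 :: b3 :: b4 :: b5 :: b6 :: b7 :: rest) none (some 8)).map (fun bit => bit != 0)) = _
        norm_num [PySem.List.slice_to, show Int.toNat 8 = 8 from rfl]
      rw [show interpret_syndrome_eigenvalues (b0 :: b1 :: b2 :: b3 :: b4 :: b5 :: b6 :: b7 :: rest) = pvACore ((if b0 = 0 then (1:Int) else -1) :: (if b1 = 0 then (1:Int) else -1) :: (if b2 = 0 then (1:Int) else -1) :: (if b3 = 0 then (1:Int) else -1) :: (if b4 = 0 then (1:Int) else -1) :: (if b5 = 0 then (1:Int) else -1) :: (if b6 = 0 then (1:Int) else -1) :: (if b7 = 0 then (1:Int) else -1) :: (rest.map (fun bit => if bit = 0 then (1:Int) else -1))) from rfl,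
          pvACore_append, ← e1, e3, ← e2]
      exact pvBridge _ _ _ _ _ _ _ _ (by simp [pvChain]) (by simp [pvPre'])
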